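-- pv_equiv track=rewrite | github.com/microsoft/ai-edu | 基础教程/A7-强化学习/draft/租车问题/src/RentCar-2-A-B.py | counter_1
-- ===== SOURCE A (Python) =====
-- def counter_1(X, ai, aj):
--     ni = 0
--     nj = 0
--     for x in range(len(X)-1):
--         if ai == X[x]:
--             ni += 1
--             if aj == X[x+1]:
--                 nj += 1
--     return ni, nj
-- ===== SOURCE B (Python) =====
-- def counter_1(X, ai, aj):
--     counts = {}
--     for p in zip(X, X[1:]):
--         counts[p] = counts.get(p, 0) + 1
--     nj = counts.get((ai, aj), 0)
--     ni = sum(c for (a, b), c in counts.items() if a == ai)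
--     return ni, nj
-- ===== Notes on version B (the rewrite author's own statement) =====
-- stated objective: alternative
-- what changed: B builds a transition-count table over all adjacent pairs once, reads nj as one table lookup and derives ni by summing over the table's distinct keys, instead of A's single scan co-incrementing two scalars.
import Mathlib
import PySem

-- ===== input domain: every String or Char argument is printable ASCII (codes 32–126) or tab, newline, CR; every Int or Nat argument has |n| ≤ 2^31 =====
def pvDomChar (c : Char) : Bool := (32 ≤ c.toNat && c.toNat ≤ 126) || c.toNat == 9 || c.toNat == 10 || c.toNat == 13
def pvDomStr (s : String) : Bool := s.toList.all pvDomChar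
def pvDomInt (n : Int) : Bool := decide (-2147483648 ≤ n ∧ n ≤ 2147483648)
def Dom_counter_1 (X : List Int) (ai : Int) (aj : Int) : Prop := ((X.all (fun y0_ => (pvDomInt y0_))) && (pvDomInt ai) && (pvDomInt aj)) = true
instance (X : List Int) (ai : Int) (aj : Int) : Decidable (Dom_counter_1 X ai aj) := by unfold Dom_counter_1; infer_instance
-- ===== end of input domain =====

-- B replaces A's single co-incrementing scan by a transition-count table (dict of adjacent
-- pairs) queried for nj and summed over its distinct keys for ni; alternative, same cost.

-- ===== PORT A =====
-- literal port of A: for x in range(len(X)-1): if ai == X[x]: ni += 1; if aj == X[x+1]: nj += 1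
def counter_1 (X : List Int) (ai : Int) (aj : Int) : Int × Int :=
  (PySem.List.pyRange 0 (PySem.List.len X - 1) 1).foldl
    (fun (s : Int × Int) x =>
      if ai == PySem.List.pyGetD X x 0 then
        (s.1 + 1, if aj == PySem.List.pyGetD X (x + 1) 0 then s.2 + 1 else s.2)
      else s) (0, 0)

-- ===== PORT B =====
-- literal port of B: counts[p] = counts.get(p,0)+1 over zip(X, X[1:]); nj = lookup; ni = sum over items
def counter_1_alt (X : List Int) (ai : Int) (aj : Int) : Int × Int :=
  let counts := (List.zip X X.tail).foldl
    (fun (d : PySem.Dict (Int × Int) Int) p => d.insert p (d.getD p 0 + 1)) PySem.Dict.empty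
  let nj := counts.getD (ai, aj) 0
  let ni := ((counts.items.filter (fun pc => pc.1.1 == ai)).map (·.2)).sum
  (ni, nj)

-- ===== PRECONDITION & SPEC =====
def Spec_counter_1 (X : List Int) (ai : Int) (aj : Int) (out : Int × Int) : Prop := out = counter_1_alt X ai aj
instance (X : List Int) (ai : Int) (aj : Int) (out : Int × Int) : Decidable (Spec_counter_1 X ai aj out) := by unfold Spec_counter_1; infer_instance

-- ===== CLAIM (what is proved, stated in full; the proofs are below) =====
def Claim_equal_counter_1 : Prop := ∀ (X : List Int) (ai : Int) (aj : Int), Dom_counter_1 X ai aj → Spec_counter_1 X ai aj (counter_1 X ai aj)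

-- ===== LEMMAS AND PROOFS =====

-- A's fold over adjacent pairs computes (countP on firsts, count of the pair), from any start.
theorem counter1_fold_pairs (ai aj : Int) (l : List (Int × Int)) (a b : Int) :
    l.foldl (fun (s : Int × Int) p =>
        if ai == p.1 then (s.1 + 1, if aj == p.2 then s.2 + 1 else s.2) else s) (a, b)
      = (a + (l.countP (fun p => p.1 == ai) : Int), b + (l.count (ai, aj) : Int)) := by
  induction l generalizing a b with
  | nil => simp
  | cons p t ih =>
    rw [List.foldl_cons]
    by_cases h1 : ai = p.1
    · by_cases h2 : aj = p.2
      · rw [if_pos (by simp [h1]), if_pos (by simp [h2]), ih]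
        have hc : (p == (ai, aj)) = true := by cases p; simp_all
        have hp1 : (p.1 == ai) = true := by simp [h1]
        simp only [List.countP_cons, List.count_cons, hc, hp1, if_true, Prod.mk.injEq]
        constructor <;> push_cast <;> ring
      · rw [if_pos (by simp [h1]), if_neg (by simp [h2]), ih]
        have hc : (p == (ai, aj)) = false := by
          cases p; simp_all [beq_iff_eq]; omega
        have hp1 : (p.1 == ai) = true := by simp [h1]
        simp only [List.countP_cons, List.count_cons, hc, hp1, if_true, Prod.mk.injEq]
        constructor <;> push_cast <;> ring
    · rw [if_neg (by simp [h1]), ih]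
      have hc : (p == (ai, aj)) = false := by
        cases p; simp_all [beq_iff_eq]; intro h; omega
      have hp1 : (p.1 == ai) = false := by simp; omega
      simp only [List.countP_cons, List.count_cons, hc, hp1, Prod.mk.injEq]
      constructor <;> push_cast <;> ring

-- A equals the same fold taken directly over zip X X.tail.
theorem counter1_eq_fold_zip (X : List Int) (ai aj : Int) :
    counter_1 X ai aj
      = (((List.zip X X.tail).countP (fun p => p.1 == ai) : Int),
         ((List.zip X X.tail).count (ai, aj) : Int)) := by
  unfold counter_1
  cases X with
  | nil => simp [PySem.List.pyRange_one_eq_nil, PySem.List.len]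
  | cons h t =>
    have hlen : (PySem.List.len (h :: t) : Int) - 1 = (PySem.List.len (List.zip (h :: t) t) : Int) := by
      simp [PySem.List.len, List.length_zip]
    have hmem : ∀ (s : Int × Int) (x : Int), x ∈ PySem.List.pyRange 0 (PySem.List.len (List.zip (h :: t) t)) 1 →
        (fun (s : Int × Int) x =>
          if ai == PySem.List.pyGetD (h :: t) x 0 then
            (s.1 + 1, if aj == PySem.List.pyGetD (h :: t) (x + 1) 0 then s.2 + 1 else s.2)
          else s) s x
        = (fun (s : Int × Int) p =>
            if ai == Prod.fst p then (s.1 + 1, if aj == Prod.snd p then s.2 + 1 else s.2) else s)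
            s (PySem.List.pyGetD (List.zip (h :: t) t) x (0, 0)) := by
      intro s x hx
      dsimp only
      rw [PySem.List.mem_pyRange_one] at hx
      obtain ⟨hx0, hxlt⟩ := hx
      have hlt : x.toNat < (List.zip (h :: t) t).length := by
        simp only [PySem.List.len, List.length_zip] at hxlt ⊢
        omega
      have hklen : x.toNat < t.length := by
        simp only [List.length_zip] at hlt
        omega
      rw [PySem.List.pyGetD_of_nonneg (h :: t) 0 hx0,
          PySem.List.pyGetD_of_nonneg (h :: t) 0 (show (0 : Int) ≤ x + 1 by omega),
          PySem.List.pyGetD_of_nonneg (List.zip (h :: t) t) (0, 0) hx0]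
      rw [List.getD_eq_getElem _ _ (show x.toNat < (h :: t).length by simp; omega),
          List.getD_eq_getElem _ _ (show (x + 1).toNat < (h :: t).length by simp; omega),
          List.getD_eq_getElem _ _ hlt]
      have hsucc : (x + 1).toNat = x.toNat + 1 := by omega
      simp [List.getElem_zip, hsucc]
    rw [hlen, PySem.List.foldl_congr_mem _ _ _ _ (fun s => hmem s),
        PySem.List.foldl_pyRange_zero_pyGetD (List.zip (h :: t) t) ((0 : Int), (0 : Int))
          (fun (s : Int × Int) p =>
            if ai == Prod.fst p then (s.1 + 1, if aj == Prod.snd p then s.2 + 1 else s.2) else s)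
          ((0 : Int), (0 : Int))]
    rw [counter1_fold_pairs]
    simp

-- B's table sum over distinct keys equals countP over the pair list.
theorem alt_ni_eq_countP (l : List (Int × Int)) (ai : Int) :
    (((PySem.Dict.counter l).items.filter (fun pc => pc.1.1 == ai)).map (·.2)).sum
      = (l.countP (fun p => p.1 == ai) : Int) := by
  rw [PySem.Dict.items_counter, List.filter_map, List.map_map]
  rw [show ((fun (pc : (Int × Int) × Int) => pc.1.1 == ai) ∘ fun k => (k, (l.count k : Int)))
        = (fun (k : Int × Int) => k.1 == ai) from rfl]
  rw [show ((fun (pc : (Int × Int) × Int) => pc.2) ∘ fun k => (k, (l.count k : Int)))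
        = ((fun (n : Nat) => (n : Int)) ∘ fun k => l.count k) from rfl]
  rw [← List.map_map, ← Nat.cast_list_sum]
  congr 1
  rw [List.Perm.sum_eq (List.Perm.map _ (List.Perm.filter _ (show (PySem.Set.ofList l).Perm l.dedup by
    rw [List.perm_ext_iff_of_nodup (PySem.Set.nodup_ofList l) l.nodup_dedup]
    intro a
    rw [PySem.Set.mem_ofList, List.mem_dedup])))]
  have hc : ∀ (k : Int × Int), l.count k = @List.count _ instBEqOfDecidableEq k l := by
    intro k
    induction l with
    | nil => rfl
    | cons p t ih => simp [List.count_cons, ih, beq_iff_eq]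
  simp only [hc]
  exact List.sum_map_count_dedup_filter_eq_countP _ l

-- ===== VERDICT (by name: the statement is the Claim_ definition above) =====
theorem counter_1_spec : Claim_equal_counter_1 := by
  intro X ai aj _
  unfold Spec_counter_1
  rw [counter1_eq_fold_zip]
  simp only [counter_1_alt, PySem.Dict.foldl_insert_getD_add_one_eq_counter]
  rw [alt_ni_eq_countP, PySem.Dict.getD_counter]
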